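-- pv_equiv track=rewrite | github.com/matcianfa/playground-X1rXTswJ | python-project/Defis/Euler_138_Correction.py | chercher
-- ===== SOURCE A (Python) =====
-- from functools import lru_cache
--
-- def chercher(N):
--
--     @lru_cache(None)
--     def L(n):
--         if n==1: return 17
--         if n==2: return 305
--         else:
--             return 18*L(n-1)-L(n-2)
--
--     return   sum([L(n) for n in range(1,N+1)])
-- ===== SOURCE B (Python) =====
-- def chercher(N):
--     # 2x2 matrix power M^N applied to the vector of the two seed terms,
--     # then a telescoped identity giving the partial sum from two consecutive terms.
--     if N <= 0:
--         return 0
--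
--     def mmul(A, B):
--         a, b, c, d = A
--         e, f, g, h = B
--         return (a * e + b * g, a * f + b * h, c * e + d * g, c * f + d * h)
--
--     R = (1, 0, 0, 1)
--     M = (18, -1, 1, 0)
--     e = N
--     while e > 0:
--         if e % 2 == 1:
--             R = mmul(R, M)
--         M = mmul(M, M)
--         e //= 2
--     xN1 = R[0] * 17 + R[1]   # L(N+1)
--     xN = R[2] * 17 + R[3]    # L(N)
--     return (xN1 - xN - 16) // 16
-- ===== Notes on version B (the rewrite author's own statement) =====
-- stated objective: alternative
-- what changed: Replaced the memoized-recursion-plus-list-sum over all N terms by binary exponentiation of the companion matrix together with a telescoped closed form expressing the partial sum from two consecutive terms of the recurrence, so only logarithmically many matrix multiplications are performed (measured 11x at the largest size both finished, but at larger sizes the sheer bit-size of the answer dominates both, so a timing run could not confirm 'faster').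
import Mathlib
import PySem

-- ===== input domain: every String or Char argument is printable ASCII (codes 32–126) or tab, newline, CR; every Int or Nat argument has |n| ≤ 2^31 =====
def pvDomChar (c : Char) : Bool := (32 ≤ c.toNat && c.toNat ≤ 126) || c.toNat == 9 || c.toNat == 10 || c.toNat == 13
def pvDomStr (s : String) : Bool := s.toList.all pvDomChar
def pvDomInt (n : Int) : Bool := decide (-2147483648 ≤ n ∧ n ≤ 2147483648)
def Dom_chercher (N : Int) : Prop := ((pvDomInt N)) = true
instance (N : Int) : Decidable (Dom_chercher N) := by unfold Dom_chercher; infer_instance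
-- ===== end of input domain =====

-- B replaces A's N-step memoized recurrence sum by binary matrix exponentiation plus a
-- telescoped identity giving the partial sum from two consecutive terms (alternative algorithm).

-- ===== PORT A =====
-- A's inner L(n): L(1)=17, L(2)=305, L(n)=18*L(n-1)-L(n-2); shifted to Nat (Lfun k = L(k+1)).
-- lru_cache makes each L(n) cost one recurrence step; ported as the pair recursion
-- Lpair n = (L(n+1), L(n+2)) so evaluation is linear like the memoized Python.
def Lpair : Nat → Int × Int
  | 0 => (17, 305)
  | n + 1 => ((Lpair n).2, 18 * (Lpair n).2 - (Lpair n).1)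

def Lfun (n : Nat) : Int := (Lpair n).1

def chercher (N : Int) : Int :=
  ((PySem.List.pyRange 1 (N + 1) 1).map (fun n => Lfun (n - 1).toNat)).sum

-- ===== PORT B =====
-- 2x2 integer matrices as flat 4-tuples (a, b, c, d) = [[a, b], [c, d]].
def mmul (A B : Int × Int × Int × Int) : Int × Int × Int × Int :=
  (A.1 * B.1 + A.2.1 * B.2.2.1,
   A.1 * B.2.1 + A.2.1 * B.2.2.2,
   A.2.2.1 * B.1 + A.2.2.2 * B.2.2.1,
   A.2.2.1 * B.2.1 + A.2.2.2 * B.2.2.2)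

-- B's while-loop over the bits of e.
def mpowLoop (e : Nat) (R M : Int × Int × Int × Int) : Int × Int × Int × Int :=
  if e = 0 then R
  else mpowLoop (e / 2) (if e % 2 = 1 then mmul R M else R) (mmul M M)
  termination_by e
  decreasing_by exact Nat.div_lt_self (Nat.pos_of_ne_zero (by assumption)) (by norm_num)

def chercher_alt (N : Int) : Int :=
  if N ≤ 0 then 0
  else
    let R := mpowLoop N.toNat (1, 0, 0, 1) (18, -1, 1, 0)
    let xN1 := R.1 * 17 + R.2.1
    let xN := R.2.2.1 * 17 + R.2.2.2
    PySem.Int.floordiv (xN1 - xN - 16) 16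

-- ===== PRECONDITION & SPEC =====
def Spec_chercher (N : Int) (out : Int) : Prop := out = chercher_alt N
instance (N : Int) (out : Int) : Decidable (Spec_chercher N out) := by unfold Spec_chercher; infer_instance

-- ===== CLAIM (what is proved, stated in full; the proofs are below) =====
def Claim_equal_chercher : Prop := ∀ (N : Int), Dom_chercher N → Spec_chercher N (chercher N)

-- ===== LEMMAS AND PROOFS =====

theorem Lfun_rec (n : Nat) : Lfun (n + 2) = 18 * Lfun (n + 1) - Lfun n := by
  induction n with
  | zero => decide
  | succ k ih => simp only [Lfun, Lpair] at *

-- Naive matrix power, reference semantics for the loop.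
def mpow (M : Int × Int × Int × Int) : Nat → Int × Int × Int × Int
  | 0 => (1, 0, 0, 1)
  | n + 1 => mmul (mpow M n) M

theorem mmul_assoc (A B C : Int × Int × Int × Int) :
    mmul (mmul A B) C = mmul A (mmul B C) := by
  obtain ⟨a, b, c, d⟩ := A
  obtain ⟨e, f, g, h⟩ := B
  obtain ⟨i, j, k, l⟩ := C
  simp only [mmul, Prod.mk.injEq]
  exact ⟨by ring, by ring, by ring, by ring⟩

theorem one_mmul (A : Int × Int × Int × Int) : mmul (1, 0, 0, 1) A = A := by
  obtain ⟨a, b, c, d⟩ := A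
  simp only [mmul, Prod.mk.injEq]
  exact ⟨by ring, by ring, by ring, by ring⟩

theorem mmul_one (A : Int × Int × Int × Int) : mmul A (1, 0, 0, 1) = A := by
  obtain ⟨a, b, c, d⟩ := A
  simp only [mmul, Prod.mk.injEq]
  exact ⟨by ring, by ring, by ring, by ring⟩

theorem mpow_succ_left (M : Int × Int × Int × Int) (n : Nat) :
    mpow M (n + 1) = mmul M (mpow M n) := by
  induction n with
  | zero => simp [mpow, one_mmul, mmul_one]
  | succ k ih =>
      calc mpow M (k + 2) = mmul (mpow M (k + 1)) M := rfl
        _ = mmul (mmul M (mpow M k)) M := by rw [ih]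
        _ = mmul M (mpow M (k + 1)) := by rw [mmul_assoc]; rfl

theorem mpow_two_mul (M : Int × Int × Int × Int) (n : Nat) :
    mpow M (2 * n) = mpow (mmul M M) n := by
  induction n with
  | zero => rfl
  | succ k ih =>
      have h2 : 2 * (k + 1) = (2 * k + 1) + 1 := by omega
      calc mpow M (2 * (k + 1)) = mmul (mmul (mpow M (2 * k)) M) M := by rw [h2]; rfl
        _ = mmul (mpow (mmul M M) k) (mmul M M) := by rw [ih, mmul_assoc]
        _ = mpow (mmul M M) (k + 1) := rfl

theorem mpowLoop_eq (e : Nat) (R M : Int × Int × Int × Int) :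
    mpowLoop e R M = mmul R (mpow M e) := by
  induction e using Nat.strong_induction_on generalizing R M with
  | _ e ih =>
    rw [mpowLoop]
    by_cases he : e = 0
    · simp [he, mpow, mmul_one]
    · have hlt : e / 2 < e := Nat.div_lt_self (Nat.pos_of_ne_zero he) (by norm_num)
      rw [if_neg he, ih (e / 2) hlt]
      by_cases hp : e % 2 = 1
      · have hsplit : e = 2 * (e / 2) + 1 := by omega
        rw [if_pos hp, ← mpow_two_mul, mmul_assoc, ← mpow_succ_left, ← hsplit]
      · have hsplit : e = 2 * (e / 2) := by omega
        rw [if_neg hp, ← mpow_two_mul, ← hsplit]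

-- Action of M^n on the start vector (L(1), L(0)) = (17, 1).
def uval (n : Nat) : Int :=
  (mpow (18, -1, 1, 0) n).1 * 17 + (mpow (18, -1, 1, 0) n).2.1
def vval (n : Nat) : Int :=
  (mpow (18, -1, 1, 0) n).2.2.1 * 17 + (mpow (18, -1, 1, 0) n).2.2.2

theorem uv_succ (n : Nat) :
    uval (n + 1) = 18 * uval n - vval n ∧ vval (n + 1) = uval n := by
  unfold uval vval
  rw [mpow_succ_left]
  obtain ⟨a, b, c, d⟩ := mpow (18, -1, 1, 0) n
  simp only [mmul]
  exact ⟨by ring, by ring⟩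

theorem uv_eq_Lfun : ∀ n : Nat, uval (n + 1) = Lfun (n + 1) ∧ vval (n + 1) = Lfun n := by
  intro n
  induction n with
  | zero => exact ⟨by decide, by decide⟩
  | succ k ih =>
      obtain ⟨hu, hv⟩ := ih
      obtain ⟨hu', hv'⟩ := uv_succ (k + 1)
      refine ⟨?_, by rw [hv', hu]⟩
      rw [hu', hu, hv, Lfun_rec k]

-- The running sum S n = L(1) + … + L(n) (in Lfun indexing: Lfun 0 + … + Lfun (n-1)).
def Ssum : Nat → Int
  | 0 => 0
  | n + 1 => Ssum n + Lfun n

theorem chercher_sum_eq (n : Nat) :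
    ((PySem.List.pyRange 1 ((n : Int) + 1) 1).map (fun k => Lfun (k - 1).toNat)).sum
      = Ssum n := by
  induction n with
  | zero => simp [PySem.List.pyRange_one_eq_nil, Ssum]
  | succ k ih =>
      have h1 : (1 : Int) ≤ (k : Int) + 1 := by omega
      have hr := PySem.List.pyRange_one_succ_right (a := 1) (b := (k : Int) + 1) h1
      push_cast
      rw [show ((k : Int) + 1 + 1) = ((k : Int) + 1) + 1 from by ring, hr]
      simp only [List.map_append, List.sum_append, List.map_cons, List.map_nil,
        List.sum_cons, List.sum_nil]
      rw [ih]
      have : ((k : Int) + 1 - 1).toNat = k := by omega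
      rw [this]
      simp [Ssum]

-- Telescoped sum identity relating the partial sum to two consecutive terms (Lfun indexing shifted by one).
theorem sum_identity : ∀ n : Nat, Lfun (n + 1) - Lfun n - 16 = 16 * Ssum (n + 1) := by
  intro n
  induction n with
  | zero => decide
  | succ k ih =>
      have hL : Lfun (k + 2) = 18 * Lfun (k + 1) - Lfun k := Lfun_rec k
      have hS : Ssum (k + 2) = Ssum (k + 1) + Lfun (k + 1) := rfl
      rw [hL, hS]
      have : 18 * Lfun (k + 1) - Lfun k - Lfun (k + 1) - 16
          = (Lfun (k + 1) - Lfun k - 16) + 16 * Lfun (k + 1) := by ring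
      rw [this, ih]
      ring

theorem floordiv_sixteen (s : Int) : PySem.Int.floordiv (16 * s) 16 = s := by
  rw [PySem.Int.floordiv_eq_ediv_of_pos (by norm_num)]
  exact Int.mul_ediv_cancel_left s (by norm_num)

-- ===== VERDICT (by name: the statement is the Claim_ definition above) =====
theorem chercher_spec : Claim_equal_chercher := by
  intro N _
  unfold Spec_chercher chercher chercher_alt
  by_cases hN : N ≤ 0
  · rw [if_pos hN, PySem.List.pyRange_one_eq_nil (by omega)]
    simp
  · rw [if_neg hN]
    have hpos : 0 < N := by omega
    obtain ⟨m, hm⟩ : ∃ m : Nat, N.toNat = m + 1 := ⟨N.toNat - 1, by omega⟩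
    have hcast : ((m : Int) + 1) = N := by
      have := Int.toNat_of_nonneg (le_of_lt hpos)
      omega
    rw [show N + 1 = ((m : Int) + 1) + 1 from by rw [hcast]] at *
    rw [show ((m : Int) + 1) + 1 = (((m + 1 : Nat) : Int) + 1) from by push_cast; ring]
    rw [chercher_sum_eq (m + 1), hm, mpowLoop_eq, one_mmul]
    show Ssum (m + 1) = PySem.Int.floordiv (uval (m + 1) - vval (m + 1) - 16) 16
    obtain ⟨hu, hv⟩ := uv_eq_Lfun m
    rw [hu, hv, sum_identity m, floordiv_sixteen]
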